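-- pv_equiv track=rewrite | github.com/JakubFr4czek/WDI | Kolokwium 2017-2018/3.py | znajdz
-- ===== SOURCE A (Python) =====
-- def znajdz(liczba):
--
--     a = 1
--     b = 1
--
--     suma = 0
--
--     while suma < liczba:
--         suma += a
--         a,b = b, a+b
--
--     if suma == liczba: return True
--
--     a = b = 1
--
--     while suma > liczba:
--         suma -= a
--         a,b = b, a+b
--
--     if suma == liczba: return True
--     return False
-- ===== SOURCE B (Python) =====
-- def znajdz(liczba):
--     # Single forward pass: collect the Fibonacci prefix sums into a set until
--     # one reaches liczba, then answer with one membership test.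
--     # liczba is a sum of consecutive Fibonacci numbers iff it is a difference of
--     # two prefix sums, and the greedy last prefix sum s works whenever any does.
--     if liczba < 0:
--         return False
--     sums = [0]
--     s = 0
--     a, b = 1, 1
--     while s < liczba:
--         s += a
--         a, b = b, a + b
--         sums.append(s)
--     return (s - liczba) in set(sums)
-- ===== Notes on version B (the rewrite author's own statement) =====
-- stated objective: idiomatic
-- what changed: Replaces A's two scalar while-loops (accumulate Fibonacci numbers, then peel them off the front again) by a single forward pass that records the Fibonacci prefix sums in a set and answers with one membership test.
-- intended difference: On negative inputs whose negation is a Fibonacci prefix sum A returns True because its second loop runs on the leftover suma, while B returns False, the intended answer since a negative number is not a sum of positive consecutive Fibonacci numbers. — e.g. on znajdz(-1): A returns true, B returns false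
import Mathlib
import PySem

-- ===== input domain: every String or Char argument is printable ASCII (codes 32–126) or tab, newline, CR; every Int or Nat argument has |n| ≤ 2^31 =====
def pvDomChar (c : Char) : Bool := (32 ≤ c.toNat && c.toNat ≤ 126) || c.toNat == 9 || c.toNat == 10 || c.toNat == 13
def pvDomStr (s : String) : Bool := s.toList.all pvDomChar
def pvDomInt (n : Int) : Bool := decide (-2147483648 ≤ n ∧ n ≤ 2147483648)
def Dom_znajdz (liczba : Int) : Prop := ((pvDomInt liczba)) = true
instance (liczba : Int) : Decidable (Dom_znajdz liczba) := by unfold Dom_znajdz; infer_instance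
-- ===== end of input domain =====

-- B replaces A's two scalar while-loops (accumulate, then peel from the front) by one pass that
-- collects the Fibonacci prefix sums into a set and answers with a single membership test (idiomatic).

-- ===== PORT A =====
-- first while loop: while suma < liczba: suma += a; a,b = b,a+b   (returns the final suma)
def znajdzLoop1 (liczba suma a b : Int) (ha : 1 ≤ a) (hb : 1 ≤ b) : Int :=
  if h : suma < liczba then znajdzLoop1 liczba (suma + a) b (a + b) hb (by omega) else suma
termination_by (liczba - suma).toNat
decreasing_by omega

-- second while loop: while suma > liczba: suma -= a; a,b = b,a+b   (returns the final suma)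
def znajdzLoop2 (liczba suma a b : Int) (ha : 1 ≤ a) (hb : 1 ≤ b) : Int :=
  if h : liczba < suma then znajdzLoop2 liczba (suma - a) b (a + b) hb (by omega) else suma
termination_by (suma - liczba).toNat
decreasing_by omega

def znajdz (liczba : Int) : Bool :=
  let suma := znajdzLoop1 liczba 0 1 1 (by norm_num) (by norm_num)
  if suma = liczba then true
  else if znajdzLoop2 liczba suma 1 1 (by norm_num) (by norm_num) = liczba then true
  else false

-- ===== PORT B =====
-- while s < liczba: s += a; a,b = b,a+b; sums.append(s)   (returns (sums, s))
def znajdzLoopB (liczba : Int) (sums : List Int) (s a b : Int) (ha : 1 ≤ a) (hb : 1 ≤ b) :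
    List Int × Int :=
  if h : s < liczba then znajdzLoopB liczba (sums ++ [s + a]) (s + a) b (a + b) hb (by omega)
  else (sums, s)
termination_by (liczba - s).toNat
decreasing_by omega

def znajdz_alt (liczba : Int) : Bool :=
  if liczba < 0 then false
  else
    let r := znajdzLoopB liczba [0] 0 1 1 (by norm_num) (by norm_num)
    decide ((r.2 - liczba) ∈ PySem.Set.ofList r.1)

-- ===== PRECONDITION & SPEC =====
-- On negative inputs whose negation is a Fibonacci prefix sum A returns True —
-- an artefact of its second loop running on the leftover suma — while B returns False, the intended
-- answer since a negative number is no sum of (positive) consecutive Fibonacci numbers.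
def D_znajdz (liczba : Int) : Prop :=
  liczba < 0 ∧ ∃ j, j < 47 ∧ (Nat.fib j : Int) = 1 - liczba
instance (liczba : Int) : Decidable (D_znajdz liczba) := by unfold D_znajdz; infer_instance

def Spec_znajdz (liczba : Int) (out : Bool) : Prop := ¬ D_znajdz liczba → out = znajdz_alt liczba
instance (liczba : Int) (out : Bool) : Decidable (Spec_znajdz liczba out) := by
  unfold Spec_znajdz; infer_instance

def pvDiffWitness_znajdz : Int := (-1)
def pvDiffWitnessOut_znajdz : Bool × Bool := (true, false)

-- ===== CLAIM (what is proved, stated in full; the proofs are below) =====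
def Claim_unchanged_znajdz : Prop := ∀ (liczba : Int), Dom_znajdz liczba → Spec_znajdz liczba (znajdz liczba)
def Claim_changed_znajdz : Prop := Dom_znajdz (pvDiffWitness_znajdz) ∧ D_znajdz (pvDiffWitness_znajdz) ∧ znajdz (pvDiffWitness_znajdz) = pvDiffWitnessOut_znajdz.1 ∧ znajdz_alt (pvDiffWitness_znajdz) = pvDiffWitnessOut_znajdz.2 ∧ pvDiffWitnessOut_znajdz.1 ≠ pvDiffWitnessOut_znajdz.2
def Claim_exact_znajdz : Prop := ∀ (liczba : Int), Dom_znajdz liczba → D_znajdz liczba → znajdz liczba ≠ znajdz_alt liczba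

-- ===== LEMMAS AND PROOFS =====

-- prefix sums of the Fibonacci-like sequence starting a, b
def fibSums (a b : Int) : ℕ → Int
  | 0 => 0
  | (k+1) => a + fibSums b (a + b) k

lemma fibSums_step (a b : Int) (ha : 1 ≤ a) (hb : 1 ≤ b) :
    ∀ k : ℕ, fibSums a b k + 1 ≤ fibSums a b (k + 1) := by
  suffices h : ∀ (k : ℕ) (a b : Int), 1 ≤ a → 1 ≤ b → fibSums a b k + 1 ≤ fibSums a b (k + 1) from
    fun k => h k a b ha hb
  intro k
  induction k with
  | zero => intro a b ha hb; simp [fibSums]; omega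
  | succ k ih =>
      intro a b ha hb
      have := ih b (a + b) hb (by omega)
      simp only [fibSums] at *
      omega

lemma fibSums_strictMono (a b : Int) (ha : 1 ≤ a) (hb : 1 ≤ b) : StrictMono (fibSums a b) :=
  strictMono_nat_of_lt_succ (fun k => by have := fibSums_step a b ha hb k; omega)

lemma fibSums_nonneg (a b : Int) (ha : 1 ≤ a) (hb : 1 ≤ b) (k : ℕ) : 0 ≤ fibSums a b k := by
  have : fibSums a b 0 ≤ fibSums a b k := (fibSums_strictMono a b ha hb).monotone (Nat.zero_le k)
  simpa [fibSums] using this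

lemma loop1_ex (liczba s a b : Int) (ha : 1 ≤ a) (hb : 1 ≤ b) :
    ∃ n : ℕ, znajdzLoop1 liczba s a b ha hb = s + fibSums a b n ∧
      ∀ m : ℕ, m < n → s + fibSums a b m < liczba := by
  fun_induction znajdzLoop1 with
  | case1 s a b ha hb h ih =>
      obtain ⟨n, hn, hlt⟩ := ih
      refine ⟨n + 1, ?_, ?_⟩
      · rw [hn]; simp only [fibSums]; ring
      · intro m hm
        cases m with
        | zero => simpa [fibSums] using h
        | succ m =>
            have := hlt m (by omega)
            simp only [fibSums] at *
            omega
  | case2 s a b ha hb h => exact ⟨0, by simp [fibSums], by omega⟩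

lemma loop2_iff (liczba s a b : Int) (ha : 1 ≤ a) (hb : 1 ≤ b) :
    znajdzLoop2 liczba s a b ha hb = liczba ↔ ∃ k : ℕ, s - fibSums a b k = liczba := by
  fun_induction znajdzLoop2 with
  | case1 s a b ha hb h ih =>
      rw [ih]
      constructor
      · rintro ⟨k, hk⟩
        exact ⟨k + 1, by simp only [fibSums] at *; omega⟩
      · rintro ⟨k, hk⟩
        cases k with
        | zero => simp [fibSums] at hk; omega
        | succ k => exact ⟨k, by simp only [fibSums] at *; omega⟩
  | case2 s a b ha hb h =>
      constructor
      · intro hs; exact ⟨0, by simp [fibSums, hs]⟩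
      · rintro ⟨k, hk⟩
        have := fibSums_nonneg a b ha hb k
        omega

lemma loopB_snd (liczba : Int) (sums : List Int) (s a b : Int) (ha : 1 ≤ a) (hb : 1 ≤ b) :
    (znajdzLoopB liczba sums s a b ha hb).2 = znajdzLoop1 liczba s a b ha hb := by
  fun_induction znajdzLoopB with
  | case1 sums s a b ha hb h ih =>
      rw [ih]
      conv_rhs => rw [znajdzLoop1]
      rw [dif_pos h]
  | case2 sums s a b ha hb h => rw [znajdzLoop1, dif_neg h]

lemma loopB_mem (liczba : Int) (sums : List Int) (s a b : Int) (ha : 1 ≤ a) (hb : 1 ≤ b)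
    (x : Int) :
    x ∈ (znajdzLoopB liczba sums s a b ha hb).1 ↔
      x ∈ sums ∨ ∃ k : ℕ, x = s + fibSums a b (k + 1) ∧ s + fibSums a b k < liczba := by
  fun_induction znajdzLoopB with
  | case1 sums s a b ha hb h ih =>
      rw [ih]
      simp only [List.mem_append, List.mem_singleton]
      constructor
      · rintro ((hx | hx) | ⟨k, hk1, hk2⟩)
        · exact Or.inl hx
        · exact Or.inr ⟨0, by simp only [fibSums] at *; omega⟩
        · refine Or.inr ⟨k + 1, ?_, ?_⟩ <;> simp only [fibSums] at * <;> omega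
      · rintro (hx | ⟨k, hk1, hk2⟩)
        · exact Or.inl (Or.inl hx)
        · cases k with
          | zero => exact Or.inl (Or.inr (by simp only [fibSums] at hk1; omega))
          | succ k =>
              refine Or.inr ⟨k, ?_, ?_⟩ <;> simp only [fibSums] at * <;> omega
  | case2 sums s a b ha hb h =>
      constructor
      · exact Or.inl
      · rintro (hx | ⟨k, hk1, hk2⟩)
        · exact hx
        · have := fibSums_nonneg a b ha hb k
          omega


lemma fibSums_eq_fib (k : ℕ) : ∀ n : ℕ,
    fibSums (Nat.fib (n + 1) : Int) (Nat.fib (n + 2) : Int) k =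
      (Nat.fib (n + k + 2) : Int) - (Nat.fib (n + 2) : Int) := by
  induction k with
  | zero => intro n; simp [fibSums]
  | succ k ih =>
      intro n
      have hc : ((Nat.fib (n + 1) : Int) + (Nat.fib (n + 2) : Int)) = (Nat.fib (n + 1 + 2) : Int) := by
        have h : Nat.fib (n + 1 + 2) = Nat.fib (n + 1) + Nat.fib (n + 1 + 1) := Nat.fib_add_two
        rw [show n + 1 + 1 = n + 2 from rfl] at h
        omega
      have h2 := ih (n + 1)
      have h3 : Nat.fib (n + 1 + 2) = Nat.fib (n + 1) + Nat.fib (n + 2) := by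
        rw [Nat.fib_add_two]
      simp only [fibSums, hc]
      have he1 : n + 1 + 1 = n + 2 := by omega
      have he2 : n + 1 + k + 2 = n + (k + 1) + 2 := by omega
      rw [he1, he2] at h2
      rw [h2]
      omega

lemma fibSums_one_one (k : ℕ) : fibSums 1 1 k = (Nat.fib (k + 2) : Int) - 1 := by
  have := fibSums_eq_fib k 0
  norm_num at this
  simpa using this

lemma fib47 : Nat.fib 47 = 2971215073 := by decide

-- for a bounded negative liczba, "-liczba is a Fibonacci prefix sum" ↔ the D_ condition
lemma neg_char (liczba : Int) (hneg : liczba < 0) (hb : -liczba ≤ 2147483648) :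
    (∃ k : ℕ, fibSums 1 1 k = -liczba) ↔ (∃ j, j < 47 ∧ (Nat.fib j : Int) = 1 - liczba) := by
  constructor
  · rintro ⟨k, hk⟩
    rw [fibSums_one_one] at hk
    refine ⟨k + 2, ?_, by omega⟩
    by_contra h
    have h47 : Nat.fib 47 ≤ Nat.fib (k + 2) := Nat.fib_mono (by omega)
    rw [fib47] at h47
    omega
  · rintro ⟨j, hj, hfib⟩
    have hj3 : 3 ≤ j := by
      by_contra h
      interval_cases j <;> simp [Nat.fib] at hfib <;> omega
    refine ⟨j - 2, ?_⟩
    rw [fibSums_one_one]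
    have he : j - 2 + 2 = j := by omega
    rw [he]
    omega

lemma znajdz_eq (liczba : Int) : znajdz liczba =
    (if znajdzLoop1 liczba 0 1 1 (by norm_num) (by norm_num) = liczba then true
     else if znajdzLoop2 liczba (znajdzLoop1 liczba 0 1 1 (by norm_num) (by norm_num)) 1 1
        (by norm_num) (by norm_num) = liczba then true
     else false) := rfl

-- on a negative input, A answers exactly "is -liczba a Fibonacci prefix sum"
lemma znajdz_neg_iff (liczba : Int) (hneg : liczba < 0) :
    znajdz liczba = true ↔ ∃ k : ℕ, fibSums 1 1 k = -liczba := by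
  have hs1 : ∀ (pa pb : (1 : Int) ≤ 1), znajdzLoop1 liczba 0 1 1 pa pb = 0 := by
    intro pa pb; rw [znajdzLoop1, dif_neg (by omega)]
  rw [znajdz_eq]
  simp only [hs1]
  rw [if_neg (by omega)]
  have h2 := loop2_iff liczba 0 1 1 (by norm_num) (by norm_num)
  constructor
  · intro h
    split_ifs at h with hh
    · obtain ⟨k, hk⟩ := h2.mp hh
      exact ⟨k, by omega⟩
  · rintro ⟨k, hk⟩
    rw [if_pos (h2.mpr ⟨k, by omega⟩)]

-- ===== VERDICT (by name: the statement is the Claim_ definition above) =====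
theorem znajdz_spec : Claim_unchanged_znajdz := by
  intro liczba hDom hD
  show znajdz liczba = znajdz_alt liczba
  by_cases hneg : liczba < 0
  · -- negative input outside D_: both sides are false
    have hB : znajdz_alt liczba = false := by simp [znajdz_alt, hneg]
    rw [hB]
    have hbound : -liczba ≤ 2147483648 := by
      have := of_decide_eq_true hDom; simp at this; omega
    rw [← Bool.not_eq_true, znajdz_neg_iff liczba hneg, neg_char liczba hneg hbound]
    intro hex
    exact hD ⟨hneg, hex⟩
  · -- liczba ≥ 0 : both sides answer "is s1 - liczba a Fibonacci prefix sum"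
    obtain ⟨n, hn, hlt⟩ := loop1_ex liczba 0 1 1 (by norm_num) (by norm_num)
    rw [Bool.eq_iff_iff]
    have hmono := fibSums_strictMono 1 1 (by norm_num) (by norm_num)
    -- A side
    have hA : znajdz liczba = true ↔
        ∃ k : ℕ, fibSums 1 1 k = znajdzLoop1 liczba 0 1 1 (by norm_num) (by norm_num) - liczba := by
      rw [znajdz_eq]
      have h2 := loop2_iff liczba (znajdzLoop1 liczba 0 1 1 (by norm_num) (by norm_num)) 1 1
        (by norm_num) (by norm_num)
      constructor
      · intro h
        split_ifs at h with ha1 ha2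
        · exact ⟨0, by simp [fibSums]; omega⟩
        · obtain ⟨k, hk⟩ := h2.mp ha2
          exact ⟨k, by omega⟩
      · rintro ⟨k, hk⟩
        split_ifs with ha1 ha2
        · rfl
        · rfl
        · exact absurd (h2.mpr ⟨k, by omega⟩) ha2
    -- B side
    have hBmem := loopB_mem liczba [0] 0 1 1 (by norm_num) (by norm_num)
    have hBsnd := loopB_snd liczba [0] 0 1 1 (by norm_num) (by norm_num)
    have hB : znajdz_alt liczba = true ↔
        ∃ k : ℕ, fibSums 1 1 k = znajdzLoop1 liczba 0 1 1 (by norm_num) (by norm_num) - liczba := by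
      unfold znajdz_alt
      rw [if_neg (by omega)]
      simp only [decide_eq_true_eq, PySem.Set.mem_ofList, hBmem, hBsnd, List.mem_singleton]
      constructor
      · rintro (h0 | ⟨k, hk1, hk2⟩)
        · exact ⟨0, by simp [fibSums]; omega⟩
        · exact ⟨k + 1, by omega⟩
      · rintro ⟨k, hk⟩
        cases k with
        | zero => simp [fibSums] at hk; exact Or.inl (by omega)
        | succ j =>
            refine Or.inr ⟨j, by omega, ?_⟩
            have hjn : j < n := by
              by_contra hge
              have : fibSums 1 1 n ≤ fibSums 1 1 j := hmono.monotone (by omega)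
              have hstep := fibSums_step 1 1 (by norm_num) (by norm_num) j
              omega
            have := hlt j hjn
            omega
    exact hA.trans hB.symm

theorem znajdz_changed : Claim_changed_znajdz := by
  unfold Claim_changed_znajdz
  refine ⟨by decide, by decide, ?_, by simp [znajdz_alt, pvDiffWitness_znajdz,
    pvDiffWitnessOut_znajdz], by decide⟩
  show znajdz (-1) = true
  rw [znajdz_neg_iff (-1) (by norm_num)]
  exact ⟨1, by simp [fibSums]⟩

theorem znajdz_tight : Claim_exact_znajdz := by
  intro liczba hDom hD
  obtain ⟨hneg, hex⟩ := hD
  have hB : znajdz_alt liczba = false := by simp [znajdz_alt, hneg]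
  rw [hB]
  have hbound : -liczba ≤ 2147483648 := by
    have := of_decide_eq_true hDom; simp at this; omega
  simp only [ne_eq, Bool.not_eq_false]
  rw [znajdz_neg_iff liczba hneg]
  exact (neg_char liczba hneg hbound).mpr hex
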